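-- pv_equiv track=rewrite | github.com/amai2222/cp_jq4 | 37.py | calculate_stakes_r9
-- ===== SOURCE A (Python) =====
-- from functools import reduce
-- from operator import mul
-- from itertools import product, combinations
--
-- def calculate_stakes_r9(parsed_bet):
--     if not parsed_bet: return 0
--     non_star_bets = [p for p in parsed_bet if p != '*']
--     if len(non_star_bets) < 9: return 0
--
--     total_stakes = 0
--     for combo_parts in combinations(non_star_bets, 9):
--         total_stakes += reduce(mul, (len(p) for p in combo_parts), 1)
--     return total_stakes
-- ===== SOURCE B (Python) =====
-- def calculate_stakes_r9(parsed_bet):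
--     # e[k] = elementary symmetric polynomial e_k of the lengths seen so far
--     e = [1] + [0] * 9
--     for p in parsed_bet:
--         if p != '*':
--             L = len(p)
--             e = [1] + [ek + L * ekm1 for ek, ekm1 in zip(e[1:], e)]
--     return e[9]
-- ===== Notes on version B (the rewrite author's own statement) =====
-- stated objective: faster
-- what changed: Replaces the enumeration of all 9-element combinations (summing the product of lengths over each) by a one-pass dynamic program computing the 9th elementary symmetric polynomial of the lengths.
import Mathlib
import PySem

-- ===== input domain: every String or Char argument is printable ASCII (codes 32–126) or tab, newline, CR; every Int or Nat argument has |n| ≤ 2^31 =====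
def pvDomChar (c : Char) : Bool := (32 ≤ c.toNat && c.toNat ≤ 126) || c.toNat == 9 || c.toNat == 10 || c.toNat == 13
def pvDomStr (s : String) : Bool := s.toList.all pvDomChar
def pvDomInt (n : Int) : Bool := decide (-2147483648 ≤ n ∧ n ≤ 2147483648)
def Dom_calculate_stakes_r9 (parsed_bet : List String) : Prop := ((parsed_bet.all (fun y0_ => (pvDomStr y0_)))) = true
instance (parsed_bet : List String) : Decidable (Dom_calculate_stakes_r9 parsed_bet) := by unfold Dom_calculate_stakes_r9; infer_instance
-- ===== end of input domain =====

-- B replaces the C(n,9)-combination enumeration by a linear DP for the 9th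
-- elementary symmetric polynomial of the lengths (faster, asymptotic).


-- ===== PORT A =====
def calculate_stakes_r9 (parsed_bet : List String) : Int :=
  if parsed_bet = [] then 0
  else
    let non_star_bets := parsed_bet.filter (fun p => p != "*")
    if non_star_bets.length < 9 then 0
    else
      (PySem.List.combinations non_star_bets 9).foldl
        (fun total_stakes combo_parts =>
          total_stakes + combo_parts.foldl (fun acc p => acc * PySem.Str.len p) 1) 0

-- ===== PORT B =====
-- one DP step: e = [1] + [ek + L * ekm1 for ek, ekm1 in zip(e[1:], e)]
def pvStepB (e : List Int) (L : Int) : List Int :=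
  1 :: ((PySem.List.slice e (some 1) none).zip e).map (fun q => q.1 + L * q.2)

-- loop body: 'if p != '*': L = len(p); e = …'
def pvLoopStep (e : List Int) (p : String) : List Int :=
  if p != "*" then pvStepB e (PySem.Str.len p) else e

def calculate_stakes_r9_alt (parsed_bet : List String) : Int :=
  let e := parsed_bet.foldl pvLoopStep (1 :: List.replicate 9 0)
  -- e[9]: e always has exactly 10 elements, so pyGet? is some; getD discharges the option
  (PySem.List.pyGet? e 9).getD 0

-- ===== PRECONDITION & SPEC =====
def Spec_calculate_stakes_r9 (parsed_bet : List String) (out : Int) : Prop := out = calculate_stakes_r9_alt parsed_bet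
instance (parsed_bet : List String) (out : Int) : Decidable (Spec_calculate_stakes_r9 parsed_bet out) := by unfold Spec_calculate_stakes_r9; infer_instance

-- ===== CLAIM (what is proved, stated in full; the proofs are below) =====
def Claim_equal_calculate_stakes_r9 : Prop := ∀ (parsed_bet : List String), Dom_calculate_stakes_r9 parsed_bet → Spec_calculate_stakes_r9 parsed_bet (calculate_stakes_r9 parsed_bet)

-- ===== LEMMAS AND PROOFS =====

-- elementary symmetric polynomial e_k, recursing on the head
def esym : Nat → List Int → Int
  | 0, _ => 1
  | _+1, [] => 0
  | k+1, x :: xs => x * esym k xs + esym (k+1) xs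

theorem esym_zero_of_short : ∀ (ls : List Int) (k : Nat), ls.length < k + 1 → esym (k+1) ls = 0 := by
  intro ls
  induction ls with
  | nil => intro k _; rfl
  | cons x xs ih =>
    intro k h
    cases k with
    | zero => simp at h
    | succ j =>
      simp only [List.length_cons] at h
      show x * esym (j+1) xs + esym (j+2) xs = 0
      rw [ih j (by omega), ih (j+1) (by omega)]
      ring

theorem esym_zero (l : List Int) : esym 0 l = 1 := by cases l <;> rfl

theorem esym_append_singleton : ∀ (xs : List Int) (x : Int) (k : Nat),
    esym (k+1) (xs ++ [x]) = esym (k+1) xs + x * esym k xs := by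
  intro xs x
  induction xs with
  | nil =>
    intro k
    cases k with
    | zero => simp [esym]
    | succ j => simp [esym]
  | cons y ys ih =>
    intro k
    cases k with
    | zero =>
      simp only [List.cons_append, esym]
      rw [ih 0]
      simp only [esym_zero]
      ring
    | succ j =>
      simp only [List.cons_append, esym]
      rw [ih j, ih (j+1)]
      ring

def pvState (ns : List Int) : List Int :=
  [esym 0 ns, esym 1 ns, esym 2 ns, esym 3 ns, esym 4 ns,
   esym 5 ns, esym 6 ns, esym 7 ns, esym 8 ns, esym 9 ns]

theorem pvStepB_state (ns : List Int) (x : Int) : pvStepB (pvState ns) x = pvState (ns ++ [x]) := by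
  simp [pvStepB, pvState, PySem.List.slice_from_one, esym_zero, esym_append_singleton]

theorem foldl_step_eq_state (ns : List Int) :
    ns.foldl pvStepB (1 :: List.replicate 9 0) = pvState ns := by
  induction ns using List.reverseRecOn with
  | nil => rfl
  | append_singleton ys x ih =>
    rw [List.foldl_append, ih, List.foldl_cons, List.foldl_nil, pvStepB_state]

theorem foldl_filter_step (l : List String) (e : List Int) :
    l.foldl pvLoopStep e
      = ((l.filter (fun p => p != "*")).map PySem.Str.len).foldl pvStepB e := by
  induction l generalizing e with
  | nil => rfl
  | cons p t ih =>
    simp only [List.foldl_cons, List.filter_cons]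
    by_cases h : p = "*"
    · simp [pvLoopStep, h, ih]
    · simp [pvLoopStep, h, ih]

theorem alt_eq_esym (parsed_bet : List String) :
    calculate_stakes_r9_alt parsed_bet
      = esym 9 ((parsed_bet.filter (fun p => p != "*")).map PySem.Str.len) := by
  unfold calculate_stakes_r9_alt
  rw [foldl_filter_step, foldl_step_eq_state]
  rfl

theorem foldl_add_eq_sum {α : Type} (f : α → Int) (l : List α) (a : Int) :
    l.foldl (fun t c => t + f c) a = a + (l.map f).sum := by
  induction l generalizing a with
  | nil => simp
  | cons x t ih => simp [List.foldl_cons, ih, add_assoc]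

theorem foldl_mul_len (c : List String) :
    c.foldl (fun acc p => acc * PySem.Str.len p) 1 = (c.map PySem.Str.len).prod := by
  rw [List.prod_eq_foldl, ← List.foldl_map]

theorem sum_combos : ∀ (ls : List Int) (k : Nat),
    ((PySem.List.combinations ls k).map List.prod).sum = esym k ls := by
  intro ls
  induction ls with
  | nil =>
    intro k
    cases k with
    | zero => simp [PySem.List.combinations_zero, esym]
    | succ j => simp [PySem.List.combinations_nil_succ, esym]
  | cons x xs ih =>
    intro k
    cases k with
    | zero => simp [PySem.List.combinations_zero, esym]
    | succ j =>
      rw [PySem.List.combinations_cons_succ]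
      show (((PySem.List.combinations xs j).map (x :: ·) ++ PySem.List.combinations xs (j+1)).map List.prod).sum
          = x * esym j xs + esym (j+1) xs
      rw [List.map_append, List.sum_append, List.map_map]
      have : ((PySem.List.combinations xs j).map (List.prod ∘ (x :: ·))).sum
          = x * ((PySem.List.combinations xs j).map List.prod).sum := by
        simp [Function.comp_def, List.prod_cons, List.sum_map_mul_left]
      rw [this, ih j, ih (j+1)]

-- ===== VERDICT (by name: the statement is the Claim_ definition above) =====
theorem calculate_stakes_r9_spec : Claim_equal_calculate_stakes_r9 := by
  intro parsed_bet _
  show calculate_stakes_r9 parsed_bet = calculate_stakes_r9_alt parsed_bet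
  rw [alt_eq_esym]
  unfold calculate_stakes_r9
  by_cases hnil : parsed_bet = []
  · subst hnil; rfl
  · simp only [hnil, if_false]
    set ns := parsed_bet.filter (fun p => p != "*") with hns
    by_cases hlen : ns.length < 9
    · rw [if_pos hlen]
      have : (ns.map PySem.Str.len).length < 8 + 1 := by simpa using hlen
      rw [esym_zero_of_short _ 8 this]
    · rw [if_neg hlen]
      rw [foldl_add_eq_sum (fun (combo_parts : List String) => combo_parts.foldl (fun acc p => acc * PySem.Str.len p) 1)]
      rw [zero_add]
      have hmap : (PySem.List.combinations ns 9).map (fun c => c.foldl (fun acc p => acc * PySem.Str.len p) 1)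
          = ((PySem.List.combinations ns 9).map (List.map PySem.Str.len)).map List.prod := by
        rw [List.map_map]
        exact List.map_congr_left (fun c _ => by simpa using foldl_mul_len c)
      rw [hmap, ← PySem.List.combinations_map, sum_combos]
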